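-- pv_equiv track=rewrite | github.com/Logesh08/LeetCode-Diaries | playground/practice/dfs_attempt_using_list.py | dfs
-- ===== SOURCE A (Python) =====
-- def dfs(depth, items, prefix='', results=None):
--     if results is None:
--         results = []
--     if depth == 0:
--         results.append(prefix)
--         return results
--     for digit in items:
--         dfs(depth - 1, items, prefix + digit, results)
--     return results
-- ===== SOURCE B (Python) =====
-- def dfs(depth, items, prefix='', results=None):
--     if results is None:
--         results = []
--     if depth < 0:
--         return results
--     current = [prefix]
--     for _ in range(depth):
--         current = [p + d for p in current for d in items]
--     results.extend(current)
--     return results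
-- ===== Notes on version B (the rewrite author's own statement) =====
-- stated objective: alternative
-- what changed: Replaces the recursive DFS with an iterative level-by-level expansion: current starts as [prefix] and is cross-producted with items depth times, then extended onto results; negative depth yields no strings.
import Mathlib
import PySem

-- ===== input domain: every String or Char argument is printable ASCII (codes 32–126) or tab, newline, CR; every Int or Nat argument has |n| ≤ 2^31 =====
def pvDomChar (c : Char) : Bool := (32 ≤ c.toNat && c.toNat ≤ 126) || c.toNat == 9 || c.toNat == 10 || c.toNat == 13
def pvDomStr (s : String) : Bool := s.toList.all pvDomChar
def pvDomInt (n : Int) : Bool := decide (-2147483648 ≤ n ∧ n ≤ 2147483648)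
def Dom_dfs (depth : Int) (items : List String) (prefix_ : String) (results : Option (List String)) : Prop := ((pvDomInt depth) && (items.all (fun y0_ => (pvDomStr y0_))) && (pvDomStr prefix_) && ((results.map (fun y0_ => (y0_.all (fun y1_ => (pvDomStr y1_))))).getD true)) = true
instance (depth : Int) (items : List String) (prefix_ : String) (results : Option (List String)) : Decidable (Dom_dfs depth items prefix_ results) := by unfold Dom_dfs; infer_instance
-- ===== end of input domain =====

-- B changes the decomposition (iterative level-by-level product instead of recursion);
-- equivalence is about the return value (both Pythons also mutate `results` to the same final state).

-- ===== PORT A =====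
-- Recursion on a fuel equal to depth.toNat: for depth ≥ 0 the fuel never runs out
-- (calls go depth, depth-1, …, 0), so this is A's recursion step for step; the
-- fuel-exhausted branch is reached only when depth < 0, where A either returns
-- `results` untouched (items = [], the loop body never runs — same value here)
-- or recurses forever (items ≠ [], excluded by Pre_dfs).
def dfsFuel (fuel : Nat) (depth : Int) (items : List String) (prefix_ : String) (results : List String) : List String :=
  if depth == 0 then results ++ [prefix_]
  else
    match fuel with
    | 0 => results
    | Nat.succ f => items.foldl (fun acc digit => dfsFuel f (depth - 1) items (prefix_ ++ digit) acc) results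

def dfs (depth : Int) (items : List String) (prefix_ : String) (results : Option (List String)) : List String :=
  dfsFuel depth.toNat depth items prefix_ (results.getD [])

-- ===== PORT B =====
-- `for _ in range(depth)` iterates depth times; the early return handles depth < 0.
def dfs_alt (depth : Int) (items : List String) (prefix_ : String) (results : Option (List String)) : List String :=
  let results' := results.getD []
  if depth < 0 then results'
  else
    results' ++ (List.range depth.toNat).foldl
      (fun cur _ => cur.flatMap (fun p => items.map (fun d => p ++ d))) [prefix_]

-- ===== PRECONDITION & SPEC =====
-- Pre_ excludes exactly the inputs on which A raises RecursionError (negative depth with non-empty items; A never returns there).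
def Pre_dfs (depth : Int) (items : List String) (prefix_ : String) (results : Option (List String)) : Prop :=
  0 ≤ depth ∨ items = []
instance (depth : Int) (items : List String) (prefix_ : String) (results : Option (List String)) : Decidable (Pre_dfs depth items prefix_ results) := by unfold Pre_dfs; infer_instance

def pvWitness_dfs : Int × List String × String × Option (List String) := (2, ["a", "b"], "", none)

def Spec_dfs (depth : Int) (items : List String) (prefix_ : String) (results : Option (List String)) (out : List String) : Prop := out = dfs_alt depth items prefix_ results
instance (depth : Int) (items : List String) (prefix_ : String) (results : Option (List String)) (out : List String) : Decidable (Spec_dfs depth items prefix_ results out) := by unfold Spec_dfs; infer_instance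

-- ===== CLAIM (what is proved, stated in full; the proofs are below) =====
def Claim_equal_dfs : Prop := ∀ (depth : Int) (items : List String) (prefix_ : String) (results : Option (List String)), Dom_dfs depth items prefix_ results → Pre_dfs depth items prefix_ results → Spec_dfs depth items prefix_ results (dfs depth items prefix_ results)

-- ===== LEMMAS AND PROOFS =====

-- The strings of length n over `items`, each prepended with p, in A's DFS order.
def expandE (items : List String) : Nat → String → List String
  | 0, p => [p]
  | Nat.succ n, p => items.flatMap (fun d => expandE items n (p ++ d))

theorem dfsFuel_eq_expandE (items : List String) : ∀ (n : Nat) (p : String) (base : List String),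
    dfsFuel n (n : Int) items p base = base ++ expandE items n p := by
  intro n
  induction n with
  | zero => intro p base; simp [dfsFuel, expandE]
  | succ n ih =>
    intro p base
    have hne : ((n + 1 : Nat) : Int) ≠ 0 := by omega
    have hpred : ((n + 1 : Nat) : Int) - 1 = (n : Int) := by push_cast; ring
    simp only [dfsFuel, beq_iff_eq, hne, if_false, hpred, expandE]
    have : (fun (acc : List String) (digit : String) =>
        dfsFuel n (n : Int) items (p ++ digit) acc)
        = fun acc digit => acc ++ expandE items n (p ++ digit) := by
      funext acc digit; exact ih (p ++ digit) acc
    rw [this, PySem.List.foldl_append_eq_flatMap]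

theorem flatMap_single {α β : Type} (f : α → β) : ∀ (l : List α), l.flatMap (fun x => [f x]) = l.map f := by
  intro l; induction l with
  | nil => rfl
  | cons a t ih => simp only [List.flatMap_cons, List.map_cons, List.singleton_append, ih]

theorem flatMap_assoc' {α β γ : Type} (f : α → List β) (g : β → List γ) :
    ∀ (l : List α), (l.flatMap f).flatMap g = l.flatMap (fun x => (f x).flatMap g) := by
  intro l; induction l with
  | nil => rfl
  | cons a t ih => simp only [List.flatMap_cons, List.flatMap_append, ih]

theorem expandE_step (items : List String) : ∀ (n : Nat) (p : String),
    (expandE items n p).flatMap (fun q => items.map (fun d => q ++ d))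
      = expandE items (n + 1) p := by
  intro n
  induction n with
  | zero =>
    intro p
    simp only [expandE, List.flatMap_cons, List.flatMap_nil, List.append_nil]
    exact (flatMap_single (fun d => p ++ d) items).symm ▸ rfl
  | succ n ih =>
    intro p
    simp only [expandE, flatMap_assoc']
    refine congrArg (items.flatMap · ) (funext fun d => ?_)
    exact ih (p ++ d)

theorem iter_eq_expandE (items : List String) : ∀ (n : Nat) (p : String),
    (List.range n).foldl (fun cur _ => cur.flatMap (fun q => items.map (fun d => q ++ d))) [p]
      = expandE items n p := by
  intro n
  induction n with
  | zero => intro p; simp [expandE]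
  | succ n ih =>
    intro p
    rw [List.range_succ, List.foldl_append, List.foldl_cons, List.foldl_nil, ih]
    exact expandE_step items n p

-- ===== VERDICT (by name: the statement is the Claim_ definition above) =====
theorem dfs_spec : Claim_equal_dfs := by
  intro depth items prefix_ results _ hpre
  unfold Spec_dfs
  by_cases h : 0 ≤ depth
  · obtain ⟨n, rfl⟩ : ∃ n : Nat, depth = (n : Int) := ⟨depth.toNat, (Int.toNat_of_nonneg h).symm⟩
    unfold dfs dfs_alt
    rw [if_neg (by omega), Int.toNat_natCast, dfsFuel_eq_expandE, iter_eq_expandE]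
  · have hitems : items = [] := hpre.resolve_left h
    have h0 : depth.toNat = 0 := Int.toNat_of_nonpos (by omega)
    have hne : depth ≠ 0 := by omega
    unfold dfs dfs_alt
    rw [h0, if_pos (by omega)]
    simp [dfsFuel, hne]
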